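-- pv_equiv track=rewrite | github.com/qenex-ai/project-context-manager | skills/project-indexing/scripts/detect-languages.py | determine_primary_language
-- ===== SOURCE A (Python) =====
-- def determine_primary_language(counts, manifests, entry_points):
--     """Determine the primary language based on multiple factors."""
--     if not counts:
--         return None
--
--     # Score each language
--     scores = {}
--     for lang in counts:
--         score = counts[lang]  # Base score: file count
--
--         # Bonus for having manifests
--         if manifests.get(lang):
--             score += 100
--
--         # Bonus for having entry points
--         if entry_points.get(lang):
--             score += 50
--
--         scores[lang] = score
--
--     # Return language with highest score
--     primary = max(scores, key=scores.get)
--     return primary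
-- ===== SOURCE B (Python) =====
-- def determine_primary_language(counts, manifests, entry_points):
--     """Single pass keeping only the running best (lang, score); no scores dict."""
--     if not counts:
--         return None
--     best_lang = None
--     best_score = None
--     for lang, count in counts.items():
--         score = count + (100 if manifests.get(lang) else 0) + (50 if entry_points.get(lang) else 0)
--         if best_score is None or score > best_score:
--             best_lang, best_score = lang, score
--     return best_lang
-- ===== Notes on version B (the rewrite author's own statement) =====
-- stated objective: simpler
-- what changed: Instead of building a full scores dict and then re-scanning it with max(scores, key=scores.get), B keeps only the running best (lang, score) in a single pass over counts, with strict > so the first language wins ties exactly like max.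
import Mathlib
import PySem

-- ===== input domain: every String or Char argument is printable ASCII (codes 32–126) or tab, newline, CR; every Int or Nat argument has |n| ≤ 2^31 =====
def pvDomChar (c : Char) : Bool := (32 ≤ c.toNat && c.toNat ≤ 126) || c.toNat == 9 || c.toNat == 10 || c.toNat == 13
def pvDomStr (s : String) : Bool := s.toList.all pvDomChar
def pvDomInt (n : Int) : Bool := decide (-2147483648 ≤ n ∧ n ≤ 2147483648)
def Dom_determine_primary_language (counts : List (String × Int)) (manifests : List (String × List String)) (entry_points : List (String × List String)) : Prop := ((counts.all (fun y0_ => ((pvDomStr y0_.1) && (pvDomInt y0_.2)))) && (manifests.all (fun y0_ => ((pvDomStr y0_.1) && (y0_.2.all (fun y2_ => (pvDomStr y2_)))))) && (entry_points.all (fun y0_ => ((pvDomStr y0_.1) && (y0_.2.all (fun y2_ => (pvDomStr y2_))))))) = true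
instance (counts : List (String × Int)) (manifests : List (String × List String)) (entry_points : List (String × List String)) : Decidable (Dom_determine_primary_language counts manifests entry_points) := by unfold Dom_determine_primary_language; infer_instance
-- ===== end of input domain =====

-- B replaces A's build-a-scores-dict-then-max(…, key=…) with a single pass keeping only the running best; objective: simpler.

-- ===== PORT A =====

-- Python truthiness of dict.get(lang) when the values are lists: present and non-empty
def pvTruthy (o : Option (List String)) : Bool :=
  match o with
  | some l => !l.isEmpty
  | none => false

-- the body of A's scoring loop: counts[lang] plus the two bonuses
def pvScoreA (cd : PySem.Dict String Int) (md ed : PySem.Dict String (List String)) (lang : String) : Int :=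
  let score := cd.getD lang 0       -- counts[lang]; lang is a key of counts so Python never raises here
  let score := if pvTruthy (md.get? lang) then score + 100 else score
  let score := if pvTruthy (ed.get? lang) then score + 50 else score
  score

def determine_primary_language (counts : List (String × Int)) (manifests : List (String × List String)) (entry_points : List (String × List String)) : Option String :=
  if counts.isEmpty then none
  else
    let cd : PySem.Dict String Int := PySem.Dict.mk counts
    let md : PySem.Dict String (List String) := PySem.Dict.mk manifests
    let ed : PySem.Dict String (List String) := PySem.Dict.mk entry_points
    -- scores = {} ; for lang in counts: … ; scores[lang] = score
    let scores : PySem.Dict String Int :=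
      counts.foldl (fun d p => d.insert p.1 (pvScoreA cd md ed p.1)) PySem.Dict.empty
    -- max(scores, key=scores.get): first key with the largest score
    scores.keys.foldl
      (fun best k =>
        match best with
        | none => some k
        | some b => if scores.getD k 0 > scores.getD b 0 then some k else best)
      none

-- ===== PORT B =====

-- B's per-item score: the pair's own count plus the two bonuses, as one sum
def pvScoreB (md ed : PySem.Dict String (List String)) (p : String × Int) : Int :=
  p.2 + (if pvTruthy (md.get? p.1) then 100 else 0) + (if pvTruthy (ed.get? p.1) then 50 else 0)

def determine_primary_language_alt (counts : List (String × Int)) (manifests : List (String × List String)) (entry_points : List (String × List String)) : Option String :=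
  if counts.isEmpty then none
  else
    let md : PySem.Dict String (List String) := PySem.Dict.mk manifests
    let ed : PySem.Dict String (List String) := PySem.Dict.mk entry_points
    (counts.foldl
      (fun (best : Option String × Option Int) p =>
        let score := pvScoreB md ed p
        match best.2 with
        | none => (some p.1, some score)
        | some bs => if score > bs then (some p.1, some score) else best)
      (none, none)).1

-- ===== PRECONDITION & SPEC =====
-- Pre_ excludes only association lists whose keys repeat: the Python arguments are dicts,
-- whose keys are necessarily distinct, so duplicate-key lists do not encode any Python input.
def Pre_determine_primary_language (counts : List (String × Int)) (manifests : List (String × List String)) (entry_points : List (String × List String)) : Prop :=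
  (counts.map Prod.fst).Nodup
instance (counts : List (String × Int)) (manifests : List (String × List String)) (entry_points : List (String × List String)) : Decidable (Pre_determine_primary_language counts manifests entry_points) := by unfold Pre_determine_primary_language; infer_instance

def pvWitness_determine_primary_language : (List (String × Int)) × (List (String × List String)) × (List (String × List String)) :=
  ([("py", 3), ("js", 3)], [("js", ["package.json"])], [("py", [])])

def Spec_determine_primary_language (counts : List (String × Int)) (manifests : List (String × List String)) (entry_points : List (String × List String)) (out : Option String) : Prop := out = determine_primary_language_alt counts manifests entry_points
instance (counts : List (String × Int)) (manifests : List (String × List String)) (entry_points : List (String × List String)) (out : Option String) : Decidable (Spec_determine_primary_language counts manifests entry_points out) := by unfold Spec_determine_primary_language; infer_instance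

-- ===== CLAIM (what is proved, stated in full; the proofs are below) =====
def Claim_equal_determine_primary_language : Prop := ∀ (counts : List (String × Int)) (manifests : List (String × List String)) (entry_points : List (String × List String)), Dom_determine_primary_language counts manifests entry_points → Pre_determine_primary_language counts manifests entry_points → Spec_determine_primary_language counts manifests entry_points (determine_primary_language counts manifests entry_points)

-- ===== LEMMAS AND PROOFS =====

-- the two folds agree once both carry a current best b whose A-score g b is B's recorded score
theorem pv_master (g : String → Int) (sc : String × Int → Int)
    (l : List (String × Int)) (h : ∀ p ∈ l, sc p = g p.1) (b : String) :
    (l.map Prod.fst).foldl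
        (fun best k =>
          match best with
          | none => some k
          | some bb => if g k > g bb then some k else best)
        (some b)
      = (l.foldl
          (fun (best : Option String × Option Int) p =>
            let score := sc p
            match best.2 with
            | none => (some p.1, some score)
            | some bs => if score > bs then (some p.1, some score) else best)
          (some b, some (g b))).1 := by
  induction l generalizing b with
  | nil => rfl
  | cons p l ih =>
    have hp : sc p = g p.1 := h p (by simp)
    have hl : ∀ q ∈ l, sc q = g q.1 := fun q hq => h q (by simp [hq])
    simp only [List.map_cons, List.foldl_cons, hp]
    by_cases hgt : g p.1 > g b
    · simp only [hgt]
      exact ih hl p.1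
    · simp only [if_neg hgt]
      exact ih hl b

theorem determine_primary_language_eq (counts : List (String × Int)) (manifests : List (String × List String)) (entry_points : List (String × List String))
    (hnd : (counts.map Prod.fst).Nodup) :
    determine_primary_language counts manifests entry_points
      = determine_primary_language_alt counts manifests entry_points := by
  unfold determine_primary_language determine_primary_language_alt
  by_cases hne : counts.isEmpty
  · simp [hne]
  · simp only [hne, if_neg, Bool.false_eq_true, not_false_eq_true]
    set cd : PySem.Dict String Int := PySem.Dict.mk counts with hcd
    set md : PySem.Dict String (List String) := PySem.Dict.mk manifests with hmd
    set ed : PySem.Dict String (List String) := PySem.Dict.mk entry_points with hed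
    -- the scores dict built by A's loop is just counts mapped through pvScoreA
    have hitems : (counts.foldl (fun d p => d.insert p.1 (pvScoreA cd md ed p.1)) PySem.Dict.empty).items
        = counts.map (fun p => (p.1, pvScoreA cd md ed p.1)) := by
      have := PySem.Dict.items_foldl_insert_fresh (l := counts) (k := Prod.fst)
        (v := fun p => pvScoreA cd md ed p.1) (d := PySem.Dict.empty)
        (by intro a _; simp [PySem.Dict.contains_empty]) hnd
      simpa using this
    set scores := counts.foldl (fun d p => d.insert p.1 (pvScoreA cd md ed p.1)) PySem.Dict.empty with hs
    have hkeysnd : scores.keys.Nodup := by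
      simp only [PySem.Dict.keys, hitems]
      simpa [List.map_map, Function.comp_def] using hnd
    -- looking a key up in scores gives its pvScoreA value
    have hget : ∀ p ∈ counts, scores.getD p.1 0 = pvScoreA cd md ed p.1 := by
      intro p hp
      exact PySem.Dict.getD_of_mem_items scores
        (by rw [hitems]; exact List.mem_map_of_mem hp) hkeysnd 0
    -- for a pair of counts, B's direct score equals A's looked-up score
    have hsc : ∀ p ∈ counts, pvScoreB md ed p = scores.getD p.1 0 := by
      intro p hp
      rw [hget p hp]
      have hcdl : cd.getD p.1 0 = p.2 :=
        PySem.Dict.getD_of_mem_items cd (by simpa [hcd] using hp)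
          (by simpa [hcd, PySem.Dict.keys] using hnd) 0
      unfold pvScoreB pvScoreA
      rw [hcdl]
      by_cases h1 : pvTruthy (md.get? p.1) <;> by_cases h2 : pvTruthy (ed.get? p.1) <;>
        simp [h1, h2]
    have hkeys : scores.keys = counts.map Prod.fst := by
      simp only [PySem.Dict.keys, hitems, List.map_map, Function.comp_def]
    rw [hkeys]
    cases counts with
    | nil => simp at hne
    | cons p0 rest =>
      have hp0 : pvScoreB md ed p0 = scores.getD p0.1 0 := hsc p0 (by simp)
      simp only [List.map_cons, List.foldl_cons, hp0]
      exact pv_master (fun k => scores.getD k 0) (pvScoreB md ed) rest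
        (fun q hq => hsc q (by simp [hq])) p0.1

-- ===== VERDICT (by name: the statement is the Claim_ definition above) =====
theorem determine_primary_language_spec : Claim_equal_determine_primary_language := by
  intro counts manifests entry_points _ hpre
  unfold Spec_determine_primary_language
  exact determine_primary_language_eq counts manifests entry_points hpre
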